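-- pv_equiv track=rewrite | github.com/xburir/DP1 | scripts/remove_points.py | remove_duplicite_points
-- ===== SOURCE A (Python) =====
-- def get_point_indexes(lst):
--     element_indices = {}
--     same_elements_array = []
--
--     for i, element in enumerate(lst):
--         if element in element_indices:
--             same_elements_array.append(element_indices[element])
--         else:
--             same_elements_array.append(i)
--             element_indices[element] = i
--
--     return same_elements_array
--
-- def remove_duplicite_points(points):
--
--
--     tuple_points = []
--
--     for pt in points:
--         tuple_points.append(tuple(pt))
--
--     pts = get_point_indexes(tuple_points)
--
--
--     i = 0
--     while i < len(pts):
--         if pts[i] < i and pts[i] != -1: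
--             val = i
--             i = pts[i]+1
--             pts[val] = -1
--             while i != val:
--                 pts[i] = -1
--                 i+=1
--         else:
--             i+=1
--
--
--     arrr = []
--     for n in pts:
--         if n != -1:
--             arrr.append(tuple_points[n])
--
--
--     arr = []
--     for pt in arrr:
--         arr.append(list(pt))
--
--     return(arr)
-- ===== SOURCE B (Python) =====
-- def remove_duplicite_points(points):
--     keys = [tuple(p) for p in points]
--     first = {}
--     for i, k in enumerate(keys):
--         if k not in first:
--             first[k] = i
--     out = []
--     minf = len(keys)
--     for j in range(len(keys) - 1, -1, -1):
--         f = first[keys[j]]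
--         if f < j:
--             minf = min(minf, f)
--         if f == j and j <= minf:
--             out.append(list(keys[j]))
--     out.reverse()
--     return out
-- ===== Notes on version B (the rewrite author's own statement) =====
-- stated objective: alternative
-- what changed: A builds the first-occurrence index list and then removes loops by repeatedly re-sweeping backward ranges with -1 markers in a stateful while-loop; B instead makes one right-to-left pass that keeps the running minimum first-occurrence index of the duplicates seen so far and decides each position from it directly.
import Mathlib
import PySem

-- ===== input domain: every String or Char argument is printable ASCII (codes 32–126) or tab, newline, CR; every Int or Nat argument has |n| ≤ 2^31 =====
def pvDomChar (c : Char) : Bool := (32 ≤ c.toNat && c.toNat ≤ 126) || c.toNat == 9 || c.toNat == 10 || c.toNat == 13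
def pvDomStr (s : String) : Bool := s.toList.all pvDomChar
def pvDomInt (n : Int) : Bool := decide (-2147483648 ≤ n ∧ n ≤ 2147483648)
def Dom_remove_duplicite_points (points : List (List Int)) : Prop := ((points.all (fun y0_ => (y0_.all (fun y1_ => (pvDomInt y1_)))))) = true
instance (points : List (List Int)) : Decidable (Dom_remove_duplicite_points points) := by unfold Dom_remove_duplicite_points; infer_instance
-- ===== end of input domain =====

-- B replaces A's mark-and-resweep of backward ranges by a single right-to-left
-- pass that keeps the minimum first-occurrence index seen so far (same return value).

-- ===== PORT A =====
-- get_point_indexes: dict of first occurrence per element; list of first-occurrence index per position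
def get_point_indexes (lst : List (List Int)) : List Int :=
  ((PySem.List.enumerate lst 0).foldl
    (fun (st : PySem.Dict (List Int) Int × List Int) ie =>
      if st.1.contains ie.2 then
        -- element_indices[element]: key present here, so getD is exact
        (st.1, st.2 ++ [st.1.getD ie.2 0])
      else
        (st.1.insert ie.2 ie.1, st.2 ++ [ie.1]))
    (PySem.Dict.empty, [])).2

def countLive (pts : List Int) : Nat := pts.countP (fun v => decide (v ≠ -1))

-- inner 'while i != val: pts[i] = -1; i += 1' (on A's data i ≤ val always holds, so 'i < val' is exact)
def markLoop (pts : List Int) (i val : Nat) : List Int :=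
  if i < val then markLoop (pts.set i (-1)) (i + 1) val else pts
  termination_by val - i

theorem countLive_set_neg_le (pts : List Int) (i : Nat) :
    countLive (pts.set i (-1)) ≤ countLive pts := by
  by_cases h : i < pts.length
  · have hdecomp : pts.take i ++ pts[i] :: pts.drop (i + 1) = pts := by
      rw [List.getElem_cons_drop]; exact List.take_append_drop i pts
    rw [List.set_eq_take_cons_drop _ h]
    conv_rhs => rw [← hdecomp]
    simp only [countLive, List.countP_append, List.countP_cons]
    split_ifs <;> simp_all
  · rw [List.set_eq_of_length_le (Nat.le_of_not_lt h)]

theorem countLive_markLoop_le (pts : List Int) (i val : Nat) :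
    countLive (markLoop pts i val) ≤ countLive pts := by
  induction pts, i using markLoop.induct (val := val) with
  | case1 pts i h ih =>
    rw [markLoop, if_pos h]
    exact le_trans ih (countLive_set_neg_le pts i)
  | case2 pts i h =>
    rw [markLoop, if_neg h]

theorem countLive_set_lt (pts : List Int) (i : Nat) (h : i < pts.length)
    (hv : pts[i] ≠ -1) : countLive (pts.set i (-1)) < countLive pts := by
  have hdecomp : pts.take i ++ pts[i] :: pts.drop (i + 1) = pts := by
    rw [List.getElem_cons_drop]; exact List.take_append_drop i pts
  rw [List.set_eq_take_cons_drop _ h]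
  conv_rhs => rw [← hdecomp]
  simp only [countLive, List.countP_append, List.countP_cons]
  split_ifs <;> simp_all

-- outer 'while i < len(pts)' loop; A's pts entries are first-occurrence indices (≥ 0) or -1,
-- so '(pts[i] + 1).toNat' is exactly Python's 'i = pts[i] + 1' on all reachable states
def whileLoop (pts : List Int) (i : Nat) : List Int :=
  if h : i < pts.length then
    if hc : pts[i] < (i : Int) ∧ pts[i] ≠ -1 then
      -- val = i; i = pts[i]+1; pts[val] = -1; mark up to val; loop continues at i = val
      whileLoop (markLoop (pts.set i (-1)) (pts[i] + 1).toNat i) i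
    else
      whileLoop pts (i + 1)
  else pts
  termination_by (countLive pts, pts.length - i)
  decreasing_by
  · apply Prod.Lex.left
    exact Nat.lt_of_le_of_lt (countLive_markLoop_le _ _ _) (countLive_set_lt pts i h hc.2)
  · have : countLive pts = countLive pts := rfl
    exact Prod.Lex.right _ (by omega)

def remove_duplicite_points (points : List (List Int)) : List (List Int) :=
  let tuple_points := points.foldl (fun acc pt => acc ++ [pt]) []
  let pts := whileLoop (get_point_indexes tuple_points) 0
  -- tuple_points[n]: every surviving n is a valid index, so pyGetD is exact
  let arrr := pts.foldl
    (fun acc n => if n ≠ -1 then acc ++ [PySem.List.pyGetD tuple_points n []] else acc) []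
  arrr.foldl (fun acc pt => acc ++ [pt]) []

-- ===== PORT B =====
-- body of B's right-to-left loop: state (minf, out), index j
def bStep (first : PySem.Dict (List Int) Int) (keys : List (List Int))
    (st : Int × List (List Int)) (j : Int) : Int × List (List Int) :=
  let k := PySem.List.pyGetD keys j []
  -- first[keys[j]]: key always present (every key was inserted), so getD is exact
  let f := first.getD k 0
  let minf := if f < j then min st.1 f else st.1
  (minf, if f = j ∧ j ≤ minf then st.2 ++ [k] else st.2)

def remove_duplicite_points_alt (points : List (List Int)) : List (List Int) :=
  let keys := points.map (fun p => p)
  let first := (PySem.List.enumerate keys 0).foldl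
    (fun (d : PySem.Dict (List Int) Int) ik =>
      if d.contains ik.2 then d else d.insert ik.2 ik.1)
    PySem.Dict.empty
  let st := (PySem.List.pyRange ((keys.length : Int) - 1) (-1) (-1)).foldl
    (bStep first keys) ((keys.length : Int), [])
  st.2.reverse

-- ===== PRECONDITION & SPEC =====
def Spec_remove_duplicite_points (points : List (List Int)) (out : List (List Int)) : Prop := out = remove_duplicite_points_alt points
instance (points : List (List Int)) (out : List (List Int)) : Decidable (Spec_remove_duplicite_points points out) := by unfold Spec_remove_duplicite_points; infer_instance

-- ===== CLAIM (what is proved, stated in full; the proofs are below) =====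
def Claim_equal_remove_duplicite_points : Prop := ∀ (points : List (List Int)), Dom_remove_duplicite_points points → Spec_remove_duplicite_points points (remove_duplicite_points points)

-- ===== LEMMAS AND PROOFS =====

-- fN keys k: index of the first occurrence of keys[k] in keys
def fN (keys : List (List Int)) (k : Nat) : Nat := List.idxOf (keys.getD k []) keys

-- survN keys i j: position j survives all markings triggered by positions k < i
def survN (keys : List (List Int)) (i j : Nat) : Prop :=
  fN keys j = j ∧ ∀ k, k < i → k < keys.length → fN keys k < k → ¬(fN keys k < j ∧ j ≤ k)

-- Boolean form of survN (kept instance-free)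
def survB (keys : List (List Int)) (i j : Nat) : Bool :=
  decide (fN keys j = j) &&
    (List.range i).all (fun k =>
      !(decide (k < keys.length) && decide (fN keys k < k) &&
        decide (fN keys k < j) && decide (j ≤ k)))

-- the common value of both programs
def commonOut (keys : List (List Int)) : List (List Int) :=
  ((List.range keys.length).filter (fun j => survB keys keys.length j)).map
    (fun j => keys.getD j [])

theorem length_markLoop (pts : List Int) (i val : Nat) :
    (markLoop pts i val).length = pts.length := by
  induction pts, i using markLoop.induct (val := val) with
  | case1 pts i h ih => rw [markLoop, if_pos h]; simpa using ih
  | case2 pts i h => rw [markLoop, if_neg h]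

theorem survB_iff (keys : List (List Int)) (i j : Nat) :
    survB keys i j = true ↔ survN keys i j := by
  unfold survB survN
  simp only [Bool.and_eq_true, decide_eq_true_eq, List.all_eq_true, List.mem_range,
    Bool.not_eq_eq_eq_not, Bool.not_true, Bool.and_eq_false_iff, decide_eq_false_iff_not]
  constructor
  · rintro ⟨h1, h2⟩
    refine ⟨h1, fun k hk1 hk2 hk3 => ?_⟩
    rintro ⟨hc1, hc2⟩
    rcases h2 k hk1 with ((h | h) | h) | h <;> omega
  · rintro ⟨h1, h2⟩
    refine ⟨h1, fun k hk1 => ?_⟩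
    by_cases hk2 : k < keys.length
    · by_cases hk3 : fN keys k < k
      · have := h2 k hk1 hk2 hk3
        by_cases hc : fN keys k < j
        · right; omega
        · left; right; omega
      · left; left; right; omega
    · left; left; left; omega

theorem fN_le (keys : List (List Int)) (j : Nat) (h : j < keys.length) : fN keys j ≤ j := by
  unfold fN
  rw [List.getD_eq_getElem _ _ h]
  by_contra hc
  have hj : j < List.findIdx (· == keys[j]) keys := by
    unfold List.idxOf at hc; omega
  have := List.not_of_lt_findIdx hj
  simp at this
  exact this rfl

-- ==== A side ====

theorem gpi_aux (rest : List (List Int)) :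
    ∀ (pre : List (List Int)) (d : PySem.Dict (List Int) Int) (arr : List Int),
    (∀ k : List Int, d.contains k = decide (k ∈ pre)) →
    (∀ k : List Int, k ∈ pre → d.getD k 0 = ((List.idxOf k (pre ++ rest) : Nat) : Int)) →
    ((PySem.List.enumerate rest (pre.length : Int)).foldl
      (fun (st : PySem.Dict (List Int) Int × List Int) ie =>
        if st.1.contains ie.2 then
          (st.1, st.2 ++ [st.1.getD ie.2 0])
        else
          (st.1.insert ie.2 ie.1, st.2 ++ [ie.1]))
      (d, arr)).2
      = arr ++ rest.map (fun e => ((List.idxOf e (pre ++ rest) : Nat) : Int)) := by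
  induction rest with
  | nil => intro pre d arr _ _; simp [PySem.List.enumerate_nil]
  | cons e rest' ih =>
    intro pre d arr hc hg
    rw [PySem.List.enumerate_cons]
    simp only [List.foldl_cons]
    have hstart : ((pre.length : Int) + 1) = (((pre ++ [e]).length : Nat) : Int) := by
      simp
    by_cases hmem : e ∈ pre
    · rw [if_pos (by rw [hc]; simpa using hmem)]
      have harr : d.getD e 0 = ((List.idxOf e (pre ++ e :: rest') : Nat) : Int) := hg e hmem
      have hrec := ih (pre ++ [e]) d (arr ++ [d.getD e 0])
        (fun k => by
          rw [hc]
          simp only [List.mem_append, List.mem_singleton]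
          by_cases h : k ∈ pre
          · simp [h]
          · have hne : k ≠ e := fun he => h (he ▸ hmem)
            simp [h, hne])
        (fun k hk => by
          simp only [List.append_assoc, List.singleton_append]
          rcases List.mem_append.mp hk with h | h
          · exact hg k h
          · simp only [List.mem_singleton] at h; subst h; exact harr)
      simp only [List.append_assoc, List.singleton_append] at hrec
      rw [hstart, hrec]
      simp [harr]
    · rw [if_neg (by rw [hc]; simpa using hmem)]
      have hidx : List.idxOf e (pre ++ e :: rest') = pre.length := by
        rw [List.idxOf_append_of_notMem hmem]; simp
      have hrec := ih (pre ++ [e]) (d.insert e (pre.length : Int)) (arr ++ [(pre.length : Int)])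
        (fun k => by
          rw [PySem.Dict.contains_insert, hc]
          simp only [List.mem_append, List.mem_singleton]
          by_cases h : k = e
          · simp [h]
          · simp [h, Ne.symm, beq_iff_eq])
        (fun k hk => by
          simp only [List.append_assoc, List.singleton_append]
          rcases List.mem_append.mp hk with h | h
          · rw [PySem.Dict.getD_insert, if_neg (fun he : k = e => hmem (he ▸ h))]
            exact hg k h
          · simp only [List.mem_singleton] at h; subst h
            rw [PySem.Dict.getD_insert, if_pos rfl, hidx])
      simp only [List.append_assoc, List.singleton_append] at hrec
      rw [hstart, hrec]
      simp [hidx]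

theorem gpi_eq (keys : List (List Int)) :
    get_point_indexes keys = keys.map (fun e => ((List.idxOf e keys : Nat) : Int)) := by
  have := gpi_aux keys [] PySem.Dict.empty []
    (fun k => by simp [PySem.Dict.contains_empty])
    (fun k hk => by simp at hk)
  simpa [get_point_indexes] using this

theorem getD_markLoop (pts : List Int) (i val : Nat) (hval : val ≤ pts.length) (j : Nat) :
    (markLoop pts i val).getD j 0 = if i ≤ j ∧ j < val then -1 else pts.getD j 0 := by
  induction pts, i using markLoop.induct (val := val) with
  | case1 pts i h ih =>
    rw [markLoop, if_pos h, ih (by simpa using hval)]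
    by_cases hji : j = i
    · subst hji
      simp [List.getD_eq_getElem?_getD, Nat.lt_of_lt_of_le h hval]
      omega
    · have hset : (pts.set i (-1)).getD j 0 = pts.getD j 0 := by
        simp [List.getD_eq_getElem?_getD, Ne.symm hji]
      rw [hset]
      split_ifs <;> first | rfl | omega
  | case2 pts i h =>
    rw [markLoop, if_neg h]
    split_ifs <;> first | rfl | omega

theorem whileLoop_inv (keys : List (List Int)) :
    ∀ (m i : Nat) (pts : List Int), keys.length - i = m → pts.length = keys.length →
    (∀ j, i ≤ j → j < keys.length → pts.getD j 0 = (fN keys j : Int)) →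
    (∀ j, j < i → j < keys.length →
      pts.getD j 0 = if survB keys i j then (j : Int) else -1) →
    whileLoop pts i =
      (List.range keys.length).map
        (fun j => if survB keys keys.length j then (j : Int) else -1) := by
  intro m
  induction m with
  | zero =>
    intro i pts hm hlen _ h2
    rw [whileLoop, dif_neg (by omega)]
    apply List.ext_getElem (by simp [hlen])
    intro j hj1 hj2
    have hjn : j < keys.length := by omega
    have := h2 j (by omega) hjn
    rw [List.getD_eq_getElem _ _ hj1] at this
    rw [this]
    have hsurv : survB keys i j = survB keys keys.length j := by
      rw [Bool.eq_iff_iff, survB_iff, survB_iff]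
      unfold survN
      constructor
      · rintro ⟨ha, hb⟩; exact ⟨ha, fun k hk1 hk2 => hb k (by omega) hk2⟩
      · rintro ⟨ha, hb⟩; exact ⟨ha, fun k hk1 hk2 => hb k hk2 hk2⟩
    simp only [List.getElem_map, List.getElem_range]
    split_ifs with hA hB hB
    · rfl
    · exact absurd (hsurv ▸ hA) hB
    · exact absurd (hsurv ▸ hB) hA
    · rfl
  | succ m ih =>
    intro i pts hm hlen h1 h2
    have hi : i < keys.length := by omega
    have hilen : i < pts.length := by omega
    have hpi : pts[i] = (fN keys i : Int) := by
      have := h1 i (le_refl i) hi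
      rwa [List.getD_eq_getElem _ _ hilen] at this
    by_cases hdup : fN keys i < i
    · -- duplicate position: Python marks the range (fN i, i] and continues at i
      have hcond : pts[i] < (i : Int) ∧ pts[i] ≠ -1 := by
        rw [hpi]
        constructor
        · exact_mod_cast hdup
        · intro hcon; omega
      rw [whileLoop, dif_pos hilen, dif_pos hcond]
      set pts' := markLoop (pts.set i (-1)) (pts[i] + 1).toNat i with hpts'
      have hlen' : pts'.length = keys.length := by
        rw [hpts', length_markLoop]; simpa using hlen
      have htoNat : (pts[i] + 1).toNat = fN keys i + 1 := by
        rw [hpi]; omega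
      have hget' : ∀ jj, jj < keys.length →
          pts'.getD jj 0 = if fN keys i < jj ∧ jj ≤ i then -1 else pts.getD jj 0 := by
        intro jj hjj
        rw [hpts', htoNat, getD_markLoop _ _ _ (by simp; omega)]
        by_cases hji : jj = i
        · rw [hji]
          have hset : (pts.set i (-1)).getD i 0 = -1 := by
            simp [List.getD_eq_getElem?_getD, hilen]
          rw [hset]
          split_ifs <;> first | rfl | omega
        · have hset : (pts.set i (-1)).getD jj 0 = pts.getD jj 0 := by
            simp [List.getD_eq_getElem?_getD, Ne.symm hji]
          rw [hset]
          split_ifs <;> first | rfl | omega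
      -- one more unfolding: pts'[i] = -1, so the loop moves on to i+1
      have hget'i : pts'[i]'(by omega) = -1 := by
        have := hget' i hi
        rwa [if_pos ⟨hdup, le_refl i⟩, List.getD_eq_getElem _ _ (by omega)] at this
      rw [whileLoop, dif_pos (by omega : i < pts'.length),
        dif_neg (by rw [hget'i]; simp)]
      apply ih (i + 1) pts' (by omega) hlen'
      · intro j hj1 hj2
        rw [hget' j hj2, if_neg (by omega)]
        exact h1 j (by omega) hj2
      · intro j hj1 hj2
        rw [hget' j hj2]
        by_cases hmarked : fN keys i < j ∧ j ≤ i
        · rw [if_pos hmarked, if_neg ?_]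
          intro hs
          exact ((survB_iff _ _ _).mp hs).2 i (by omega) hi hdup ⟨hmarked.1, hmarked.2⟩
        · rw [if_neg hmarked]
          have hji : j < i := by
            rcases Nat.lt_or_ge (fN keys i) j with h | h
            · omega
            · omega
          rw [h2 j hji hj2]
          have hiff : survB keys i j = survB keys (i + 1) j := by
            rw [Bool.eq_iff_iff, survB_iff, survB_iff]
            unfold survN
            constructor
            · rintro ⟨ha, hb⟩
              refine ⟨ha, fun k hk1 hk2 hk3 => ?_⟩
              rcases Nat.lt_or_ge k i with hk | hk
              · exact hb k hk hk2 hk3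
              · have hki : k = i := by omega
                rw [hki]
                intro ⟨hc1, hc2⟩
                exact hmarked ⟨hc1, by omega⟩
            · rintro ⟨ha, hb⟩
              exact ⟨ha, fun k hk1 hk2 hk3 => hb k (by omega) hk2 hk3⟩
          split_ifs with hA hB hB
          · rfl
          · exact absurd (hiff ▸ hA) hB
          · exact absurd (hiff ▸ hB) hA
          · rfl
    · -- first occurrence: the loop just advances
      have hfi : fN keys i = i := Nat.le_antisymm (fN_le keys i hi) (by omega)
      have hcond : ¬(pts[i] < (i : Int) ∧ pts[i] ≠ -1) := by
        rw [hpi, hfi]; simp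
      rw [whileLoop, dif_pos hilen, dif_neg hcond]
      apply ih (i + 1) pts (by omega) hlen
      · intro j hj1 hj2
        exact h1 j (by omega) hj2
      · intro j hj1 hj2
        by_cases hji : j = i
        · subst hji
          rw [h1 j (le_refl j) hj2, hfi, if_pos ((survB_iff _ _ _).mpr ?_)]
          refine ⟨hfi, fun k hk1 hk2 hk3 => ?_⟩
          intro ⟨hc1, hc2⟩
          rcases Nat.lt_or_ge k j with hk | hk
          · omega
          · have hkj : k = j := by omega
            rw [hkj] at hk3
            omega
        · have hji' : j < i := by omega
          rw [h2 j hji' hj2]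
          have hiff : survB keys i j = survB keys (i + 1) j := by
            rw [Bool.eq_iff_iff, survB_iff, survB_iff]
            unfold survN
            constructor
            · rintro ⟨ha, hb⟩
              refine ⟨ha, fun k hk1 hk2 hk3 => ?_⟩
              rcases Nat.lt_or_ge k i with hk | hk
              · exact hb k hk hk2 hk3
              · have hki : k = i := by omega
                rw [hki] at hk3
                omega
            · rintro ⟨ha, hb⟩
              exact ⟨ha, fun k hk1 hk2 hk3 => hb k (by omega) hk2 hk3⟩
          split_ifs with hA hB hB
          · rfl
          · exact absurd (hiff ▸ hA) hB
          · exact absurd (hiff ▸ hB) hA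
          · rfl

theorem foldA (keys : List (List Int)) :
    ∀ (l : List Nat) (acc : List (List Int)),
    ((l.map (fun j => if survB keys keys.length j then (j : Int) else -1)).foldl
      (fun acc x => if x ≠ -1 then acc ++ [PySem.List.pyGetD keys x []] else acc) acc)
    = acc ++ (l.filter (fun j => survB keys keys.length j)).map
        (fun j => keys.getD j []) := by
  intro l
  induction l with
  | nil => intro acc; simp
  | cons j l' ih =>
    intro acc
    simp only [List.map_cons, List.foldl_cons, List.filter_cons]
    by_cases hs : survB keys keys.length j = true
    · rw [if_pos hs, if_pos (show ((j : Int)) ≠ -1 by omega), PySem.List.pyGetD_natCast, ih]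
      simp [hs]
    · rw [if_neg hs, if_neg (show ¬((-1 : Int) ≠ -1) by simp), ih]
      simp [hs]

theorem A_eq_commonOut (points : List (List Int)) :
    remove_duplicite_points points = commonOut points := by
  unfold remove_duplicite_points
  simp only [PySem.List.foldl_append_singleton, List.nil_append]
  rw [gpi_eq]
  rw [whileLoop_inv points (points.length - 0) 0 _ rfl (by simp)
    (fun j hj1 hj2 => by
      rw [List.getD_eq_getElem _ _ (by simpa using hj2)]
      simp only [List.getElem_map]
      unfold fN
      rw [List.getD_eq_getElem _ _ hj2])
    (fun j hj1 hj2 => by omega)]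
  rw [foldA points (List.range points.length) [], List.nil_append]
  rfl

-- ==== B side ====

-- Mf keys t: minimum first-occurrence index over duplicate positions k ≥ t (default: length)
def Mf (keys : List (List Int)) (t : Nat) : Int :=
  if t < keys.length then
    (if fN keys t < t then min (Mf keys (t + 1)) (fN keys t : Int) else Mf keys (t + 1))
  else (keys.length : Int)
  termination_by keys.length - t

theorem le_Mf_iff (keys : List (List Int)) (t : Nat) (ht : t ≤ keys.length) :
    ∀ s, ((t : Int) ≤ Mf keys s ↔
      ∀ k, s ≤ k → k < keys.length → fN keys k < k → t ≤ fN keys k) := by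
  suffices h : ∀ (fuel s : Nat), keys.length - s ≤ fuel →
      ((t : Int) ≤ Mf keys s ↔
        ∀ k, s ≤ k → k < keys.length → fN keys k < k → t ≤ fN keys k) by
    intro s; exact h keys.length s (by omega)
  intro fuel
  induction fuel with
  | zero =>
    intro s hs
    rw [Mf, if_neg (by omega)]
    constructor
    · intro _ k hk1 hk2; omega
    · intro _; exact_mod_cast ht
  | succ fuel ihf =>
    intro s hs
    by_cases hsn : s < keys.length
    · rw [Mf, if_pos hsn]
      have ihs := ihf (s + 1) (by omega)
      by_cases hd : fN keys s < s
      · rw [if_pos hd, le_min_iff, ihs]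
        constructor
        · rintro ⟨h1, h2⟩ k hk1 hk2 hk3
          by_cases hks : k = s
          · rw [hks]; exact_mod_cast h2
          · exact h1 k (by omega) hk2 hk3
        · intro h
          exact ⟨fun k hk1 hk2 hk3 => h k (by omega) hk2 hk3,
            by exact_mod_cast h s (le_refl s) hsn hd⟩
      · rw [if_neg hd, ihs]
        constructor
        · intro h k hk1 hk2 hk3
          by_cases hks : k = s
          · rw [hks] at hk3; omega
          · exact h k (by omega) hk2 hk3
        · intro h k hk1 hk2 hk3
          exact h k (by omega) hk2 hk3
    · rw [Mf, if_neg hsn]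
      constructor
      · intro _ k hk1 hk2; omega
      · intro _; exact_mod_cast ht

theorem bdict_aux (rest : List (List Int)) :
    ∀ (pre : List (List Int)) (d : PySem.Dict (List Int) Int),
    (∀ k : List Int, d.contains k = decide (k ∈ pre)) →
    (∀ k : List Int, k ∈ pre → d.getD k 0 = ((List.idxOf k (pre ++ rest) : Nat) : Int)) →
    ∀ k : List Int, k ∈ pre ++ rest →
    ((PySem.List.enumerate rest (pre.length : Int)).foldl
      (fun (d : PySem.Dict (List Int) Int) ik =>
        if d.contains ik.2 then d else d.insert ik.2 ik.1) d).getD k 0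
      = ((List.idxOf k (pre ++ rest) : Nat) : Int) := by
  induction rest with
  | nil =>
    intro pre d _ hg k hk
    rw [PySem.List.enumerate_nil]
    exact hg k (by simpa using hk)
  | cons e rest' ih =>
    intro pre d hc hg k hk
    rw [PySem.List.enumerate_cons]
    simp only [List.foldl_cons]
    have hstart : ((pre.length : Int) + 1) = (((pre ++ [e]).length : Nat) : Int) := by
      simp
    have hk' : k ∈ (pre ++ [e]) ++ rest' := by
      simpa [List.append_assoc] using hk
    by_cases hmem : e ∈ pre
    · rw [if_pos (by rw [hc]; simpa using hmem)]
      have hrec := ih (pre ++ [e]) d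
        (fun k' => by
          rw [hc]
          simp only [List.mem_append, List.mem_singleton]
          by_cases h : k' ∈ pre
          · simp [h]
          · have hne : k' ≠ e := fun he => h (he ▸ hmem)
            simp [h, hne])
        (fun k' hk'' => by
          simp only [List.append_assoc, List.singleton_append]
          rcases List.mem_append.mp hk'' with h | h
          · exact hg k' h
          · simp only [List.mem_singleton] at h; rw [h]; exact hg e hmem)
        k hk'
      rw [hstart]
      simpa [List.append_assoc] using hrec
    · rw [if_neg (by rw [hc]; simpa using hmem)]
      have hidx : List.idxOf e (pre ++ e :: rest') = pre.length := by
        rw [List.idxOf_append_of_notMem hmem]; simp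
      have hrec := ih (pre ++ [e]) (d.insert e (pre.length : Int))
        (fun k' => by
          rw [PySem.Dict.contains_insert, hc]
          simp only [List.mem_append, List.mem_singleton]
          by_cases h : k' = e
          · simp [h]
          · simp [h, Ne.symm, beq_iff_eq])
        (fun k' hk'' => by
          simp only [List.append_assoc, List.singleton_append]
          rcases List.mem_append.mp hk'' with h | h
          · rw [PySem.Dict.getD_insert, if_neg (fun he : k' = e => hmem (he ▸ h))]
            exact hg k' h
          · simp only [List.mem_singleton] at h; rw [h]
            rw [PySem.Dict.getD_insert, if_pos rfl, hidx])
        k hk'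
      rw [hstart]
      simpa [List.append_assoc] using hrec

theorem bdict_getD (keys : List (List Int)) (k : List Int) (hk : k ∈ keys) :
    ((PySem.List.enumerate keys 0).foldl
      (fun (d : PySem.Dict (List Int) Int) ik =>
        if d.contains ik.2 then d else d.insert ik.2 ik.1)
      PySem.Dict.empty).getD k 0 = ((List.idxOf k keys : Nat) : Int) := by
  have := bdict_aux keys [] PySem.Dict.empty
    (fun k' => by simp [PySem.Dict.contains_empty])
    (fun k' hk' => by simp at hk')
    k (by simpa using hk)
  simpa using this

theorem B_fold (keys : List (List Int)) (d : PySem.Dict (List Int) Int)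
    (hd : ∀ k : List Int, k ∈ keys → d.getD k 0 = ((List.idxOf k keys : Nat) : Int)) :
    ∀ (t : Nat), t ≤ keys.length → ∀ (out : List (List Int)),
    (PySem.List.pyRange ((t : Int) - 1) (-1) (-1)).foldl (bStep d keys) (Mf keys t, out)
    = (Mf keys 0,
       out ++ (((List.range t).filter (fun j => survB keys keys.length j)).map
         (fun j => keys.getD j [])).reverse) := by
  intro t
  induction t with
  | zero =>
    intro _ out
    rw [show ((0 : Nat) : Int) - 1 = -1 by norm_num,
      PySem.List.pyRange_neg_one_eq_nil (by norm_num)]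
    simp
  | succ t iht =>
    intro hts out
    have hklt : t < keys.length := by omega
    rw [show (((t + 1 : Nat)) : Int) - 1 = ((t : Nat) : Int) by push_cast; ring,
      PySem.List.pyRange_neg_one_cons (by omega)]
    simp only [List.foldl_cons]
    have hkmem : keys.getD t [] ∈ keys := by
      rw [List.getD_eq_getElem _ _ hklt]; exact keys.getElem_mem _
    have hkey : PySem.List.pyGetD keys ((t : Nat) : Int) [] = keys.getD t [] :=
      PySem.List.pyGetD_natCast keys t []
    have hf : d.getD (keys.getD t []) 0 = ((fN keys t : Nat) : Int) := by
      rw [hd _ hkmem]; rfl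
    have hminf : (if ((fN keys t : Nat) : Int) < ((t : Nat) : Int)
          then min (Mf keys (t + 1)) ((fN keys t : Nat) : Int) else Mf keys (t + 1))
        = Mf keys t := by
      conv_rhs => rw [Mf, if_pos hklt]
      by_cases hd' : fN keys t < t
      · rw [if_pos hd', if_pos (by exact_mod_cast hd')]
      · rw [if_neg hd', if_neg (by exact_mod_cast hd')]
    have hcond : (((fN keys t : Nat) : Int) = ((t : Nat) : Int) ∧ ((t : Nat) : Int) ≤ Mf keys t)
        ↔ survN keys keys.length t := by
      rw [Nat.cast_inj, le_Mf_iff keys t (le_of_lt hklt) t]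
      unfold survN
      constructor
      · rintro ⟨h1', h2'⟩
        refine ⟨h1', fun k hk1 hk2 hk3 => ?_⟩
        rintro ⟨hc1, hc2⟩
        exact absurd (h2' k hc2 hk2 hk3) (by omega)
      · rintro ⟨h1', h2'⟩
        refine ⟨h1', fun k hk1 hk2 hk3 => ?_⟩
        have := h2' k hk2 hk2 hk3
        omega
    simp only [bStep, hkey, hf, hminf]
    rw [iht (by omega)]
    congr 1
    rw [List.range_succ, List.filter_append, List.map_append, List.reverse_append]
    simp only [List.filter_cons, List.filter_nil]
    by_cases hs : survN keys keys.length t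
    · have hsb : survB keys keys.length t = true := (survB_iff _ _ _).mpr hs
      rw [if_pos (hcond.mpr hs)]
      simp [hsb, List.append_assoc]
    · have hsb : survB keys keys.length t = false := by
        rw [Bool.eq_false_iff]
        exact fun h => hs ((survB_iff _ _ _).mp h)
      rw [if_neg (fun hc => hs (hcond.mp hc))]
      simp [hsb]

theorem B_eq_commonOut (points : List (List Int)) :
    remove_duplicite_points_alt points = commonOut points := by
  unfold remove_duplicite_points_alt
  simp only [List.map_id']
  have hMn : Mf points points.length = ((points.length : Nat) : Int) := by
    rw [Mf, if_neg (lt_irrefl _)]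
  nth_rewrite 1 [← hMn]
  rw [B_fold points _ (fun k hk => bdict_getD points k hk) points.length (le_refl _) []]
  simp [commonOut]

-- ===== VERDICT (by name: the statement is the Claim_ definition above) =====
theorem remove_duplicite_points_spec : Claim_equal_remove_duplicite_points := by
  intro points _
  unfold Spec_remove_duplicite_points
  rw [A_eq_commonOut, B_eq_commonOut]
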